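-- pv_equiv track=rewrite | github.com/git25math/25maths-examhub | scripts/build-figures.py | clean_tikz
-- ===== SOURCE A (Python) =====
-- def clean_tikz(raw):
--     """Strip wrapping \\begin{center}/\\end{center} and comment headers."""
--     lines = []
--     in_header = True
--     for line in raw.split('\n'):
--         stripped = line.strip()
--         # Skip comment-only header block at top
--         if in_header and (stripped.startswith('%%') or stripped == ''):
--             continue
--         in_header = False
--         # Remove center environment wrapping
--         if stripped in (r'\begin{center}', r'\end{center}'):
--             continue
--         lines.append(line)
--     return '\n'.join(lines).strip()
-- ===== SOURCE B (Python) =====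
-- def clean_tikz(raw):
--     """Strip wrapping \\begin{center}/\\end{center} and comment headers."""
--     lines = raw.split('\n')
--     # Phase 1: drop the leading run of blank / '%%'-comment lines.
--     i = 0
--     while i < len(lines) and (lines[i].strip() == '' or lines[i].strip().startswith('%%')):
--         i += 1
--     # Phase 2: filter out center-environment wrapper lines.
--     kept = [l for l in lines[i:]
--             if l.strip() not in (r'\begin{center}', r'\end{center}')]
--     return '\n'.join(kept).strip()
-- ===== Notes on version B (the rewrite author's own statement) =====
-- stated objective: simpler
-- what changed: Replaced A's single stateful loop with an in_header flag by two phases: an index-advance past the leading run of blank or comment-only header lines, then a filter removing the center-environment wrapper lines.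
import Mathlib
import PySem

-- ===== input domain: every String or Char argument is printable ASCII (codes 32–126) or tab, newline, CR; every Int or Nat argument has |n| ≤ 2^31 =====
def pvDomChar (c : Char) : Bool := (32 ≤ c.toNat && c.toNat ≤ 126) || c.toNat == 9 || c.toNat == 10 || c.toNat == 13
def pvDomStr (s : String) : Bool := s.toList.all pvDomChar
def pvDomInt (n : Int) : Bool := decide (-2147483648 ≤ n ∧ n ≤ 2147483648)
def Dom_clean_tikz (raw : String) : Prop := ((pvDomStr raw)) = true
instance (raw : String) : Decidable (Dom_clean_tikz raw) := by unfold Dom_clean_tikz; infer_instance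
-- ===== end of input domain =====

-- B strips the header as a separate prefix-drop phase and removes the center
-- wrappers with a filter, eliminating A's mutable in_header flag (objective: simpler).

-- ===== PORT A =====
-- A's loop body: state is (collected lines, in_header flag).
def cleanTikzStepA (st : List String × Bool) (line : String) : List String × Bool :=
  let stripped := PySem.Str.strip line
  if st.2 && (PySem.Str.startswith stripped "%%" || stripped == "") then st
  else if stripped == "\\begin{center}" || stripped == "\\end{center}" then (st.1, false)
  else (st.1 ++ [line], false)

def clean_tikz (raw : String) : String :=
  let st := ((PySem.Str.split? raw "\n").getD []).foldl cleanTikzStepA ([], true)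
  PySem.Str.strip (PySem.Str.join "\n" st.1)

-- ===== PORT B =====
def cleanTikzIsHeader (l : String) : Bool :=
  PySem.Str.strip l == "" || PySem.Str.startswith (PySem.Str.strip l) "%%"

def cleanTikzIsCenter (l : String) : Bool :=
  PySem.Str.strip l == "\\begin{center}" || PySem.Str.strip l == "\\end{center}"

-- B's phase-1 while loop: advance past the leading header run (lines[i:]).
def cleanTikzDropHeader : List String → List String
  | [] => []
  | l :: ls => if cleanTikzIsHeader l then cleanTikzDropHeader ls else l :: ls

def clean_tikz_alt (raw : String) : String :=
  let lines := (PySem.Str.split? raw "\n").getD []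
  let kept := (cleanTikzDropHeader lines).filter (fun l => !cleanTikzIsCenter l)
  PySem.Str.strip (PySem.Str.join "\n" kept)

-- ===== PRECONDITION & SPEC =====
def Spec_clean_tikz (raw : String) (out : String) : Prop := out = clean_tikz_alt raw
instance (raw : String) (out : String) : Decidable (Spec_clean_tikz raw out) := by unfold Spec_clean_tikz; infer_instance

-- ===== CLAIM (what is proved, stated in full; the proofs are below) =====
def Claim_equal_clean_tikz : Prop := ∀ (raw : String), Dom_clean_tikz raw → Spec_clean_tikz raw (clean_tikz raw)

-- ===== LEMMAS AND PROOFS =====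

-- A's step, phrased through B's two predicates (pure boolean rearrangement).
theorem cleanTikzStepA_eq (acc : List String) (b : Bool) (l : String) :
    cleanTikzStepA (acc, b) l =
      if b && cleanTikzIsHeader l then (acc, b)
      else if cleanTikzIsCenter l then (acc, false)
      else (acc ++ [l], false) := by
  cases b <;> cases h1 : (PySem.Str.strip l == "") <;>
    cases h2 : PySem.Str.startswith (PySem.Str.strip l) "%%" <;>
      simp [cleanTikzStepA, cleanTikzIsHeader, cleanTikzIsCenter, h1, h2]

-- Once in_header is false, A's loop is a filter by the center test.
theorem cleanTikz_foldl_false (ls : List String) (acc : List String) :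
    (ls.foldl cleanTikzStepA (acc, false)).1 = acc ++ ls.filter (fun l => !cleanTikzIsCenter l) := by
  induction ls generalizing acc with
  | nil => simp
  | cons l ls ih =>
    rw [List.foldl_cons, cleanTikzStepA_eq]
    simp only [Bool.false_and, if_false, List.filter_cons]
    by_cases hc : cleanTikzIsCenter l = true
    · simp [hc, ih]
    · simp only [Bool.not_eq_true] at hc
      simp [hc, ih]

-- From the initial state, A's loop agrees with drop-header-then-filter.
theorem cleanTikz_foldl_true (ls : List String) :
    (ls.foldl cleanTikzStepA ([], true)).1
      = (cleanTikzDropHeader ls).filter (fun l => !cleanTikzIsCenter l) := by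
  induction ls with
  | nil => simp [cleanTikzDropHeader]
  | cons l ls ih =>
    rw [List.foldl_cons, cleanTikzStepA_eq]
    simp only [Bool.true_and, cleanTikzDropHeader]
    by_cases hh : cleanTikzIsHeader l = true
    · simp [hh, ih]
    · simp only [Bool.not_eq_true] at hh
      simp only [hh, if_false, Bool.false_eq_true]
      by_cases hc : cleanTikzIsCenter l = true
      · rw [if_pos hc, cleanTikz_foldl_false]
        simp [hc, List.filter_cons]
      · simp only [Bool.not_eq_true] at hc
        rw [if_neg (by simp [hc]), cleanTikz_foldl_false]
        simp [hc, List.filter_cons]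

-- ===== VERDICT (by name: the statement is the Claim_ definition above) =====
theorem clean_tikz_spec : Claim_equal_clean_tikz := by
  intro raw _
  simp only [Spec_clean_tikz, clean_tikz, clean_tikz_alt, cleanTikz_foldl_true]
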